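-- pv_equiv track=rewrite | github.com/jimyjiang/lmrl-plugin | mp3_player.py | find_previous_segment
-- ===== SOURCE A (Python) =====
-- def find_previous_segment(segments, current_pos, last_skip_pos=None):
--     """
--     在音频分段中找到前一个播放区间的开始位置
--
--     参数:
--         segments: 已排序的非负整数数组，表示各段的开始位置
--         current_pos: 当前播放位置
--         last_skip_pos: 上一次跳转的位置(可选)
--
--     返回:
--         前一个区间的开始位置，如果不存在则返回None
--     """
--     # 找到所有小于current_pos的段开始位置
--     candidates = [s for s in segments if s < current_pos]
--
--     if not candidates:
--         return None
--
--     # 如果有last_skip_pos，我们需要跳过它找到更早的段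
--     if last_skip_pos is not None:
--         candidates = [s for s in candidates if s < last_skip_pos]
--         if not candidates:
--             return None
--
--     return max(candidates)
-- ===== SOURCE B (Python) =====
-- def find_previous_segment(segments, current_pos, last_skip_pos=None):
--     threshold = current_pos if last_skip_pos is None else min(current_pos, last_skip_pos)
--     srt = sorted(segments)
--     lo, hi = 0, len(srt)
--     while lo < hi:
--         mid = (lo + hi) // 2
--         if srt[mid] < threshold:
--             lo = mid + 1
--         else:
--             hi = mid
--     return srt[lo - 1] if lo > 0 else None
-- ===== Notes on version B (the rewrite author's own statement) =====
-- stated objective: alternative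
-- what changed: Replaces A's filter-then-max scans by sorting a copy and binary-searching (bisect_left by hand) for the insertion point of the combined threshold min(current_pos, last_skip_pos); the answer is the sorted element just before that point.
import Mathlib
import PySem

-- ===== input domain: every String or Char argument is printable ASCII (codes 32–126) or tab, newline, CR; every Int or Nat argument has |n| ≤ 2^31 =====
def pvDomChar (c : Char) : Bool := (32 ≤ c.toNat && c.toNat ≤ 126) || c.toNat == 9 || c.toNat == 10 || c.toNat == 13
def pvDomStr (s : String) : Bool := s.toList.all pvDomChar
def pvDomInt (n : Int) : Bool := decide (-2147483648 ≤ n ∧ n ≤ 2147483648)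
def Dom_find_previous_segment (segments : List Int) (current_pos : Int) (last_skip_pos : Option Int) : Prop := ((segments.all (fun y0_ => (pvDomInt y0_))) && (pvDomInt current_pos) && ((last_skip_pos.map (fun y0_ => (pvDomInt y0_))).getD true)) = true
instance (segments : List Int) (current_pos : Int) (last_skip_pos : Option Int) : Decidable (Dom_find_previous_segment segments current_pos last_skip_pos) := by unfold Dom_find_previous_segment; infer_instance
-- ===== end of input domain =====

-- B sorts a copy and binary-searches for the insertion point of min(current_pos, last_skip_pos),
-- returning the sorted element just before it, instead of A's filter passes plus max() (objective: alternative).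

-- ===== PORT A =====
def find_previous_segment (segments : List Int) (current_pos : Int) (last_skip_pos : Option Int) : Option Int :=
  let candidates := segments.filter (fun s => decide (s < current_pos))
  if candidates = [] then none
  else
    match last_skip_pos with
    | some lsp =>
        let candidates2 := candidates.filter (fun s => decide (s < lsp))
        if candidates2 = [] then none
        else PySem.List.max? candidates2 (fun x => x)
    | none => PySem.List.max? candidates (fun x => x)

-- ===== PORT B =====
-- hand-written bisect_left loop of Source B ('mid = (lo+hi)//2' inlined at its two uses)
-- (lo, hi are nonnegative, so Python's '//2' is Nat division here)
def fpsBisect (srt : List Int) (t : Int) (lo hi : Nat) : Nat :=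
  if _ : lo < hi then
    if srt.getD ((lo + hi) / 2) 0 < t then fpsBisect srt t ((lo + hi) / 2 + 1) hi
    else fpsBisect srt t lo ((lo + hi) / 2)
  else lo
termination_by hi - lo
decreasing_by all_goals omega

def find_previous_segment_alt (segments : List Int) (current_pos : Int) (last_skip_pos : Option Int) : Option Int :=
  let threshold := match last_skip_pos with | none => current_pos | some lsp => min current_pos lsp
  let srt := PySem.List.sorted segments (fun x => x) false
  let lo := fpsBisect srt threshold 0 srt.length
  if lo > 0 then some (srt.getD (lo - 1) 0) else none

-- ===== PRECONDITION & SPEC =====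
def Spec_find_previous_segment (segments : List Int) (current_pos : Int) (last_skip_pos : Option Int) (out : Option Int) : Prop := out = find_previous_segment_alt segments current_pos last_skip_pos
instance (segments : List Int) (current_pos : Int) (last_skip_pos : Option Int) (out : Option Int) : Decidable (Spec_find_previous_segment segments current_pos last_skip_pos out) := by unfold Spec_find_previous_segment; infer_instance

-- ===== CLAIM (what is proved, stated in full; the proofs are below) =====
def Claim_equal_find_previous_segment : Prop := ∀ (segments : List Int) (current_pos : Int) (last_skip_pos : Option Int), Dom_find_previous_segment segments current_pos last_skip_pos → Spec_find_previous_segment segments current_pos last_skip_pos (find_previous_segment segments current_pos last_skip_pos)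

-- ===== LEMMAS AND PROOFS =====

-- A's nested filters with the lsp-filter equal one filter below min cp lsp.
theorem filter_min_split (segments : List Int) (cp lsp : Int) :
    segments.filter (fun s => decide (s < min cp lsp))
      = (segments.filter (fun s => decide (s < cp))).filter (fun s => decide (s < lsp)) := by
  rw [List.filter_filter]
  apply List.filter_congr
  intro x _
  rw [← Bool.decide_and]
  exact decide_eq_decide.mpr (by omega)

-- A is max() of the elements below the combined threshold.
theorem A_eq_max_filter (segments : List Int) (cp : Int) (lsk : Option Int) :
    find_previous_segment segments cp lsk
      = PySem.List.max?
          (segments.filter (fun s => decide (s < match lsk with | none => cp | some l => min cp l)))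
          (fun x => x) := by
  unfold find_previous_segment
  cases lsk with
  | none =>
      simp only
      split
      · next h => rw [h]; simp [PySem.List.max?]
      · rfl
  | some lsp =>
      simp only [filter_min_split]
      split
      · next h => rw [h]; simp [PySem.List.max?]
      · split
        · next h2 => rw [h2]; simp [PySem.List.max?]
        · rfl

-- max() with no key is determined by the multiset of elements.
theorem max?_id_eq_of_perm (xs ys : List Int) (hp : xs.Perm ys) :
    PySem.List.max? xs (fun x => x) = PySem.List.max? ys (fun x => x) := by
  by_cases hxs : xs = []
  · subst hxs
    rw [List.nil_perm.mp hp]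
  · have hys : ys ≠ [] := fun h => hxs (List.perm_nil.mp (h ▸ hp))
    obtain ⟨m, h1⟩ := Option.ne_none_iff_exists'.mp
      (mt (PySem.List.max?_eq_none_iff xs (fun x => x)).mp hxs)
    obtain ⟨m', h2⟩ := Option.ne_none_iff_exists'.mp
      (mt (PySem.List.max?_eq_none_iff ys (fun x => x)).mp hys)
    have hm := PySem.List.max?_mem h1
    have hm' := PySem.List.max?_mem h2
    have hle1 : m ≤ m' := PySem.List.max?_isMax h2 m (hp.mem_iff.mp hm)
    have hle2 : m' ≤ m := PySem.List.max?_isMax h1 m' (hp.mem_iff.mpr hm')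
    rw [h1, h2, le_antisymm hle1 hle2]

-- positional monotonicity of a pairwise-nondecreasing list
theorem pairwise_le_getElem_mono (l : List Int) (hs : l.Pairwise (fun a b => a ≤ b))
    {j k : Nat} (hj : j < l.length) (hk : k < l.length) (hjk : j ≤ k) : l[j] ≤ l[k] := by
  rcases Nat.eq_or_lt_of_le hjk with rfl | h
  · exact le_refl _
  · exact List.pairwise_iff_getElem.mp hs j k hj hk h

-- the hand-written bisect loop partitions a sorted list at the threshold
theorem fpsBisect_spec (srt : List Int) (t : Int)
    (hs : srt.Pairwise (fun a b => a ≤ b)) :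
    ∀ (lo hi : Nat), lo ≤ hi → hi ≤ srt.length →
    (∀ j (hj : j < srt.length), j < lo → srt[j] < t) →
    (∀ j (hj : j < srt.length), hi ≤ j → t ≤ srt[j]) →
    fpsBisect srt t lo hi ≤ srt.length ∧
      (∀ j (hj : j < srt.length), j < fpsBisect srt t lo hi → srt[j] < t) ∧
      (∀ j (hj : j < srt.length), fpsBisect srt t lo hi ≤ j → t ≤ srt[j]) := by
  intro lo hi
  induction hlt : hi - lo using Nat.strong_induction_on generalizing lo hi with
  | _ d ih =>
    intro hlohi hhi hbelow habove
    rw [fpsBisect]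
    split
    · next h =>
      have hmidlt : (lo + hi) / 2 < srt.length := by omega
      have hmidlo : lo ≤ (lo + hi) / 2 := by omega
      have hmidhi : (lo + hi) / 2 < hi := by omega
      rw [List.getD_eq_getElem srt 0 hmidlt]
      by_cases hc : srt[(lo + hi) / 2] < t
      · rw [if_pos hc]
        refine ih (hi - ((lo + hi) / 2 + 1)) (by omega) _ _ rfl (by omega) hhi ?_ habove
        intro j hj hjlt
        by_cases hjlo : j < lo
        · exact hbelow j hj hjlo
        · exact lt_of_le_of_lt
            (pairwise_le_getElem_mono srt hs hj hmidlt (by omega)) hc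
      · rw [if_neg hc]
        refine ih ((lo + hi) / 2 - lo) (by omega) _ _ rfl (by omega) (by omega) hbelow ?_
        intro j hj hjge
        by_cases hjhi : hi ≤ j
        · exact habove j hj hjhi
        · exact le_trans (le_of_not_gt hc)
            (pairwise_le_getElem_mono srt hs hmidlt hj hjge)
    · next h =>
      exact ⟨by omega, fun j hj hjlt => hbelow j hj (by omega),
             fun j hj hge => habove j hj (by omega)⟩

-- sorted elements below the cut are exactly the filtered prefix
theorem filter_sorted_eq_take (srt : List Int) (t : Int) (i : Nat)
    (hi : i ≤ srt.length)
    (hbelow : ∀ j (hj : j < srt.length), j < i → srt[j] < t)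
    (habove : ∀ j (hj : j < srt.length), i ≤ j → t ≤ srt[j]) :
    srt.filter (fun s => decide (s < t)) = srt.take i := by
  conv_lhs => rw [← List.take_append_drop i srt]
  rw [List.filter_append]
  have h1 : (srt.take i).filter (fun s => decide (s < t)) = srt.take i := by
    rw [List.filter_eq_self]
    intro a ha
    obtain ⟨j, hm, hje⟩ := List.mem_take_iff_getElem.mp ha
    subst hje
    exact decide_eq_true (hbelow j (by omega) (by omega))
  have h2 : (srt.drop i).filter (fun s => decide (s < t)) = [] := by
    rw [List.filter_eq_nil_iff]
    intro a ha
    obtain ⟨j, hm, hje⟩ := List.mem_drop_iff_getElem.mp ha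
    subst hje
    simpa using not_lt.mpr (habove (i + j) (by omega) (by omega))
  rw [h1, h2, List.append_nil]

-- max() of a nonempty nondecreasing prefix is its last element
theorem max?_sorted_take (srt : List Int) (i : Nat)
    (hs : srt.Pairwise (fun a b => a ≤ b)) (h0 : 0 < i) (hi : i ≤ srt.length) :
    PySem.List.max? (srt.take i) (fun x => x) = some (srt[i - 1]'(by omega)) := by
  have hlen : (srt.take i).length = i := by simp [Nat.min_eq_left hi]
  have hne : srt.take i ≠ [] := by
    intro h; rw [h] at hlen; simp at hlen; omega
  obtain ⟨m, h1⟩ := Option.ne_none_iff_exists'.mp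
    (mt (PySem.List.max?_eq_none_iff (srt.take i) (fun x => x)).mp hne)
  have hlast : srt[i - 1]'(by omega) ∈ srt.take i := by
    have h' : i - 1 < (srt.take i).length := by omega
    have := List.getElem_mem h'
    rwa [List.getElem_take] at this
  have hub : m ≤ srt[i - 1]'(by omega) := by
    obtain ⟨j, hm, hje⟩ := List.mem_take_iff_getElem.mp (PySem.List.max?_mem h1)
    rw [← hje]
    exact pairwise_le_getElem_mono srt hs (by omega) (by omega) (by omega)
  have hlb : srt[i - 1]'(by omega) ≤ m := PySem.List.max?_isMax h1 _ hlast
  rw [h1, le_antisymm hub hlb]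

-- ===== VERDICT (by name: the statement is the Claim_ definition above) =====
theorem find_previous_segment_spec : Claim_equal_find_previous_segment := by
  intro segments cp lsk _
  unfold Spec_find_previous_segment
  rw [A_eq_max_filter]
  unfold find_previous_segment_alt
  simp only
  set t := (match lsk with | none => cp | some l => min cp l) with ht
  set srt := PySem.List.sorted segments (fun x => x) false with hsrt
  have hperm : srt.Perm segments := PySem.List.sorted_perm segments (fun x => x) false
  have hpair : srt.Pairwise (fun a b => a ≤ b) :=
    PySem.List.sorted_pairwise segments (fun x => x)
  have hspec := fpsBisect_spec srt t hpair 0 srt.length (by omega) (le_refl _)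
    (by intro j hj hlt; omega) (by intro j hj hge; omega)
  set i := fpsBisect srt t 0 srt.length with hib
  obtain ⟨hle, hbelow, habove⟩ := hspec
  rw [max?_id_eq_of_perm _ _ ((hperm.filter _).symm),
      filter_sorted_eq_take srt t i hle hbelow habove]
  by_cases h0 : 0 < i
  · rw [max?_sorted_take srt i hpair h0 hle]
    have hlt : i - 1 < srt.length := by omega
    rw [if_pos h0, List.getD_eq_getElem srt 0 hlt]
  · have hz : i = 0 := by omega
    rw [hz]
    simp [PySem.List.max?]
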